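-- pv_equiv track=rewrite | github.com/plooney81/python101 | tic_tac_toe.py | place_move
-- ===== SOURCE A (Python) =====
-- def place_move(row, col, list_param, char):
--     # place an x at the index they inputted
--     for x in range(3):
--         for y in range(3):
--             if (x == row and y == col):
--                 if y != 2:
--                     list_param[x][y] = f'__{char}__|'
--                 else:
--                     list_param[x][y] = f'__{char}__'
--     return list_param
-- ===== SOURCE B (Python) =====
-- def place_move(row, col, list_param, char):
--     # Direct indexed assignment instead of scanning all 9 cells.
--     # Mutates list_param in place, like the original.
--     if 0 <= row < 3 and 0 <= col < 3:
--         list_param[row][col] = f'__{char}__' if col == 2 else f'__{char}__|'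
--     return list_param
-- ===== Notes on version B (the rewrite author's own statement) =====
-- stated objective: simpler
-- what changed: B replaces A's 3x3 nested scan over all nine cells with a single bounds-checked direct indexed assignment.
import Mathlib
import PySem

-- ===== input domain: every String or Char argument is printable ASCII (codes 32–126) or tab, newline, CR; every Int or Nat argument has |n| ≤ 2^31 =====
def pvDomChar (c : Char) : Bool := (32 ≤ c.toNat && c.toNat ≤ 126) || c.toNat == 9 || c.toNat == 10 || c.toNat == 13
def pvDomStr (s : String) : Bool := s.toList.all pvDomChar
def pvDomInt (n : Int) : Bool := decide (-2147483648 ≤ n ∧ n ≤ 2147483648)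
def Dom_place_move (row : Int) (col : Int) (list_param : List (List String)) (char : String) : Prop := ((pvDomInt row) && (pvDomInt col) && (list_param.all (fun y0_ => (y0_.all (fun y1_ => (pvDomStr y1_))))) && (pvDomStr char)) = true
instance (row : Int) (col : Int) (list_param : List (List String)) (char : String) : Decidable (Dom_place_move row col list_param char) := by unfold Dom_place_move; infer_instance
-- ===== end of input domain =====

-- B replaces A's 3x3 nested scan over all nine cells with a single bounds-checked direct
-- indexed assignment (objective: simpler). Python A and B both mutate list_param in place;
-- the equivalence here is about the returned value.

-- Shared cell-assignment primitive: list_param[x][y] = v for nonnegative in-range indices.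
-- Out-of-range indices leave the list unchanged; Python raises IndexError there, and such
-- inputs are excluded by Pre_place_move.
def setCell (xs : List (List String)) (x y : Nat) (v : String) : List (List String) :=
  xs.set x ((xs.getD x []).set y v)

-- ===== PORT A =====
def place_move (row : Int) (col : Int) (list_param : List (List String)) (char : String) : List (List String) :=
  (PySem.List.pyRange 0 3 1).foldl (fun acc x =>
    (PySem.List.pyRange 0 3 1).foldl (fun acc2 y =>
      if x == row && y == col then
        if y != 2 then setCell acc2 x.toNat y.toNat ("__" ++ char ++ "__|")
        else setCell acc2 x.toNat y.toNat ("__" ++ char ++ "__")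
      else acc2) acc) list_param

-- ===== PORT B =====
def place_move_alt (row : Int) (col : Int) (list_param : List (List String)) (char : String) : List (List String) :=
  if 0 ≤ row ∧ row < 3 ∧ 0 ≤ col ∧ col < 3 then
    setCell list_param row.toNat col.toNat
      (if col == 2 then "__" ++ char ++ "__" else "__" ++ char ++ "__|")
  else list_param

-- ===== PRECONDITION & SPEC =====
-- Pre_ excludes exactly the inputs where Python A raises IndexError: in-bounds (row, col)
-- coordinates whose target cell does not exist in list_param.
def Pre_place_move (row : Int) (col : Int) (list_param : List (List String)) (char : String) : Prop :=
  (0 ≤ row ∧ row < 3 ∧ 0 ≤ col ∧ col < 3) →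
    (row < (list_param.length : Int) ∧ col < ((list_param.getD row.toNat []).length : Int))
instance (row : Int) (col : Int) (list_param : List (List String)) (char : String) : Decidable (Pre_place_move row col list_param char) := by unfold Pre_place_move; infer_instance

def pvWitness_place_move : Int × Int × List (List String) × String :=
  (1, 2, [["a", "b", "c"], ["d", "e", "f"], ["g", "h", "i"]], "X")

def Spec_place_move (row : Int) (col : Int) (list_param : List (List String)) (char : String) (out : List (List String)) : Prop := out = place_move_alt row col list_param char
instance (row : Int) (col : Int) (list_param : List (List String)) (char : String) (out : List (List String)) : Decidable (Spec_place_move row col list_param char out) := by unfold Spec_place_move; infer_instance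

-- ===== CLAIM (what is proved, stated in full; the proofs are below) =====
def Claim_equal_place_move : Prop := ∀ (row : Int) (col : Int) (list_param : List (List String)) (char : String), Dom_place_move row col list_param char → Pre_place_move row col list_param char → Spec_place_move row col list_param char (place_move row col list_param char)

-- ===== LEMMAS AND PROOFS =====

theorem pyRange03 : PySem.List.pyRange 0 3 1 = [0, 1, 2] := by decide

-- ===== VERDICT (by name: the statement is the Claim_ definition above) =====
theorem place_move_spec : Claim_equal_place_move := by
  intro row col list_param char _ _
  unfold Spec_place_move place_move place_move_alt
  rw [pyRange03]
  by_cases h : 0 ≤ row ∧ row < 3 ∧ 0 ≤ col ∧ col < 3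
  · obtain ⟨h0, h1, h2, h3⟩ := h
    have hr : row = 0 ∨ row = 1 ∨ row = 2 := by omega
    have hc : col = 0 ∨ col = 1 ∨ col = 2 := by omega
    rcases hr with rfl | rfl | rfl <;> rcases hc with rfl | rfl | rfl <;>
      simp [List.foldl]
  · rw [if_neg h]
    have hx : ∀ x y : Int, 0 ≤ x → x < 3 → 0 ≤ y → y < 3 → ((x == row && y == col) = false) := by
      intro x y hx0 hx1 hy0 hy1
      cases hb : (x == row && y == col) with
      | false => rfl
      | true => simp only [Bool.and_eq_true, beq_iff_eq] at hb; omega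
    simp [List.foldl,
      hx 0 0 (by omega) (by omega) (by omega) (by omega),
      hx 0 1 (by omega) (by omega) (by omega) (by omega),
      hx 0 2 (by omega) (by omega) (by omega) (by omega),
      hx 1 0 (by omega) (by omega) (by omega) (by omega),
      hx 1 1 (by omega) (by omega) (by omega) (by omega),
      hx 1 2 (by omega) (by omega) (by omega) (by omega),
      hx 2 0 (by omega) (by omega) (by omega) (by omega),
      hx 2 1 (by omega) (by omega) (by omega) (by omega),
      hx 2 2 (by omega) (by omega) (by omega) (by omega)]
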